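-- pv_equiv track=rewrite | github.com/varesa/netbox2freeipa | test.py | find_zone
-- ===== SOURCE A (Python) =====
-- def find_zone(zones, name):
--     zone_match = ""
--     for zone in zones:
--         if name.endswith(zone):
--             if len(zone) > len(zone_match):
--                 zone_match = zone
--
--     if len(zone_match) and len(zone_match) != len(name):
--         return zone_match
--
--     return None
-- ===== SOURCE B (Python) =====
-- def find_zone(zones, name):
--     zs = set(zones)
--     for L in range(len(name), 0, -1):
--         if name[-L:] in zs:
--             return None if L == len(name) else name[-L:]
--     return None
-- ===== Notes on version B (the rewrite author's own statement) =====
-- stated objective: alternative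
-- what changed: Instead of scanning every zone and keeping the longest suffix match, B builds a set of the zones once and probes the suffixes of name from longest to shortest, returning at the first (hence longest) suffix found in the set (None if it is the whole name).
import Mathlib
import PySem

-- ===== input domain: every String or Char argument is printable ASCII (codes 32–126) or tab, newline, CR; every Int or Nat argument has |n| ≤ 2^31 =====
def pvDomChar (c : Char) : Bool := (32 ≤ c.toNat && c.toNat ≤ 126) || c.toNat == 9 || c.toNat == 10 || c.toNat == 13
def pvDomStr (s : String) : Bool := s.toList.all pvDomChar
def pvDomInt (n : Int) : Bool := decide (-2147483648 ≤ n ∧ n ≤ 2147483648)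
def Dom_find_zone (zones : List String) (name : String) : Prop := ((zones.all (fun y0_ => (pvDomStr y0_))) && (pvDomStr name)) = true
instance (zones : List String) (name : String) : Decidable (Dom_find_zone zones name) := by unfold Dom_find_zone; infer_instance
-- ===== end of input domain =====

-- B replaces A's scan over all zones (keeping the longest suffix match) by a set of the
-- zones probed with name's suffixes from longest to shortest; alternative decomposition, not claimed faster.

-- ===== PORT A =====
def find_zone (zones : List String) (name : String) : Option String :=
  let zone_match := zones.foldl (fun zone_match zone =>
    if PySem.Str.endswith name zone then
      if PySem.Str.len zone > PySem.Str.len zone_match then zone else zone_match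
    else zone_match) ""
  if PySem.Str.len zone_match ≠ 0 ∧ PySem.Str.len zone_match ≠ PySem.Str.len name then
    some zone_match
  else
    none

-- ===== PORT B =====
-- the 'for L in range(len(name), 0, -1)' loop of Source B, as recursion on L counting down
def fzLoop (zs : List String) (name : String) (n : Int) : Nat → Option String
  | 0 => none
  | L + 1 =>
      let suf := PySem.Str.slice name (some (-((L + 1 : Nat) : Int))) none
      if PySem.Set.contains zs suf then
        if ((L + 1 : Nat) : Int) = n then none else some suf
      else fzLoop zs name n L

def find_zone_alt (zones : List String) (name : String) : Option String :=
  let zs := PySem.Set.ofList zones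
  fzLoop zs name (PySem.Str.len name) (PySem.Str.len name).toNat

-- ===== PRECONDITION & SPEC =====
def Spec_find_zone (zones : List String) (name : String) (out : Option String) : Prop := out = find_zone_alt zones name
instance (zones : List String) (name : String) (out : Option String) : Decidable (Spec_find_zone zones name out) := by unfold Spec_find_zone; infer_instance

-- ===== CLAIM (what is proved, stated in full; the proofs are below) =====
def Claim_equal_find_zone : Prop := ∀ (zones : List String) (name : String), Dom_find_zone zones name → Spec_find_zone zones name (find_zone zones name)

-- ===== LEMMAS AND PROOFS =====

-- invariant of A's fold: the accumulator is the longest zone so far that is a suffix of name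
theorem fz_fold_spec (name : String) (zs : List String) (acc : String)
    (hacc : acc.toList <:+ name.toList) :
    ∃ m, zs.foldl (fun zone_match zone =>
        if PySem.Str.endswith name zone then
          if PySem.Str.len zone > PySem.Str.len zone_match then zone else zone_match
        else zone_match) acc = m ∧
      m.toList <:+ name.toList ∧ (m = acc ∨ m ∈ zs) ∧
      acc.toList.length ≤ m.toList.length ∧
      (∀ z ∈ zs, z.toList <:+ name.toList → z.toList.length ≤ m.toList.length) := by
  induction zs generalizing acc with
  | nil => exact ⟨acc, rfl, hacc, Or.inl rfl, le_rfl, by simp⟩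
  | cons z zs ih =>
    by_cases hz : PySem.Str.endswith name z = true
    · have hzsuf : z.toList <:+ name.toList :=
        (PySem.Chars.endswith_iff _ _).mp (by simpa using hz)
      by_cases hlt : PySem.Str.len z > PySem.Str.len acc
      · obtain ⟨m, hmeq, hmsuf, hmmem, hmlen, hmmax⟩ := ih z hzsuf
        have hlt' : acc.toList.length < z.toList.length := by
          simpa using hlt
        refine ⟨m, by rw [List.foldl_cons, if_pos hz, if_pos hlt]; exact hmeq, hmsuf, ?_, ?_, ?_⟩
        · rcases hmmem with h | h
          · exact Or.inr (h ▸ List.mem_cons_self ..)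
          · exact Or.inr (List.mem_cons_of_mem _ h)
        · omega
        · intro z' hz' hsuf'
          rcases List.mem_cons.mp hz' with h | h
          · exact h ▸ hmlen
          · exact hmmax z' h hsuf'
      · obtain ⟨m, hmeq, hmsuf, hmmem, hmlen, hmmax⟩ := ih acc hacc
        have hle : z.toList.length ≤ acc.toList.length := by
          simp only [PySem.Str.len_eq, gt_iff_lt, not_lt] at hlt
          exact_mod_cast hlt
        refine ⟨m, by rw [List.foldl_cons, if_pos hz, if_neg hlt]; exact hmeq, hmsuf, ?_, hmlen, ?_⟩
        · rcases hmmem with h | h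
          · exact Or.inl h
          · exact Or.inr (List.mem_cons_of_mem _ h)
        · intro z' hz' hsuf'
          rcases List.mem_cons.mp hz' with h | h
          · exact h ▸ le_trans hle hmlen
          · exact hmmax z' h hsuf'
    · obtain ⟨m, hmeq, hmsuf, hmmem, hmlen, hmmax⟩ := ih acc hacc
      refine ⟨m, by rw [List.foldl_cons, if_neg hz]; exact hmeq, hmsuf, ?_, hmlen, ?_⟩
      · rcases hmmem with h | h
        · exact Or.inl h
        · exact Or.inr (List.mem_cons_of_mem _ h)
      · intro z' hz' hsuf'
        rcases List.mem_cons.mp hz' with h | h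
        · exact absurd ((PySem.Chars.endswith_iff _ _).mpr (h ▸ hsuf')) (by simpa using hz)
        · exact hmmax z' h hsuf'

-- B's countdown loop, related to the longest matching zone m found by A's fold
theorem fz_loop_spec (zones : List String) (name : String) (m : String)
    (hm : m.toList <:+ name.toList)
    (hmem : m = "" ∨ m ∈ zones)
    (hmax : ∀ z ∈ zones, z.toList <:+ name.toList → z.toList.length ≤ m.toList.length)
    (L : Nat) (hL : L ≤ name.toList.length) (hK : m.toList.length ≤ L) :
    fzLoop (PySem.Set.ofList zones) name (name.toList.length : Int) L =
      (if m.toList.length = 0 ∨ m.toList.length = name.toList.length then none else some m) := by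
  induction L with
  | zero =>
    have h0 : m.toList.length = 0 := Nat.le_zero.mp hK
    simp [fzLoop, h0]
  | succ L ih =>
    have hsufl : (PySem.Str.slice name (some (-((L + 1 : Nat) : Int))) none).toList
        = name.toList.drop (name.toList.length - (L + 1)) := by
      rw [PySem.Str.toList_slice, PySem.Chars.slice_eq_listSlice,
        PySem.List.slice_from_neg_natCast _ _ (Nat.succ_pos L)]
    have hsuflen : (PySem.Str.slice name (some (-((L + 1 : Nat) : Int))) none).toList.length
        = L + 1 := by
      rw [hsufl, List.length_drop]; omega
    have hmdrop : m.toList = name.toList.drop (name.toList.length - m.toList.length) := by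
      exact List.suffix_iff_eq_drop.mp hm
    by_cases hc : PySem.Set.contains (PySem.Set.ofList zones)
        (PySem.Str.slice name (some (-((L + 1 : Nat) : Int))) none) = true
    · have hsufmem : (PySem.Str.slice name (some (-((L + 1 : Nat) : Int))) none) ∈ zones :=
        (PySem.Set.mem_ofList _ _).mp ((PySem.Set.contains_iff _ _).mp hc)
      have hsufsuf : (PySem.Str.slice name (some (-((L + 1 : Nat) : Int))) none).toList
          <:+ name.toList := by rw [hsufl]; exact List.drop_suffix _ _
      have hle : L + 1 ≤ m.toList.length := by
        have := hmax _ hsufmem hsufsuf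
        omega
      have hKeq : m.toList.length = L + 1 := le_antisymm hK hle
      have hmeq : m = PySem.Str.slice name (some (-((L + 1 : Nat) : Int))) none := by
        apply String.toList_inj.mp
        rw [hmdrop, hsufl, hKeq]
      simp only [fzLoop]
      rw [if_pos hc]
      by_cases hn : L + 1 = name.toList.length
      · have h1 : ((L + 1 : Nat) : Int) = (name.toList.length : Int) := by exact_mod_cast hn
        rw [if_pos h1, if_pos (Or.inr (by omega))]
      · have h1 : ¬ ((L + 1 : Nat) : Int) = (name.toList.length : Int) := by exact_mod_cast hn
        rw [if_neg h1, if_neg (by omega), hmeq]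
    · have hKne : m.toList.length ≠ L + 1 := by
        intro hKeq
        have hmne : m ≠ "" := by
          intro h; rw [h] at hKeq; simp at hKeq
        have hmzones : m ∈ zones := hmem.resolve_left hmne
        have hmeq : m = PySem.Str.slice name (some (-((L + 1 : Nat) : Int))) none := by
          apply String.toList_inj.mp
          rw [hmdrop, hsufl, hKeq]
        exact hc ((PySem.Set.contains_iff _ _).mpr ((PySem.Set.mem_ofList _ _).mpr (hmeq ▸ hmzones)))
      simp only [fzLoop]
      rw [if_neg hc]
      exact ih (by omega) (by omega)

-- ===== VERDICT (by name: the statement is the Claim_ definition above) =====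
theorem find_zone_spec : Claim_equal_find_zone := by
  intro zones name _
  simp only [Spec_find_zone, find_zone, find_zone_alt]
  obtain ⟨m, hmeq, hmsuf, hmmem, _, hmmax⟩ :=
    fz_fold_spec name zones "" (by simp)
  have hmem : m = "" ∨ m ∈ zones := hmmem
  have hKn : m.toList.length ≤ name.toList.length := hmsuf.length_le
  have hloop := fz_loop_spec zones name m hmsuf hmem hmmax name.toList.length le_rfl hKn
  rw [hmeq,
    show PySem.Str.len m = (m.toList.length : Int) from by simp,
    show PySem.Str.len name = (name.toList.length : Int) from by simp,
    Int.toNat_natCast, hloop]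
  split_ifs with h1 h2 <;> first | rfl | (exfalso; omega)
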